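-- pv_equiv track=rewrite | github.com/zmfpdl64/Programers_code_test | 프로그래머스/2단계/택배배달과수거하기3.py | solution
-- ===== SOURCE A (Python) =====
-- def solution(cap, n, deli, pick):
--     answer = 0
--     deli = deli[::-1]
--     pick = pick[::-1]
--     p = 0
--     d = 0
--     for i in range(n):
--         p += pick[i]
--         d += deli[i]
--         while p > 0 or d > 0:
--             p -= cap
--             d -= cap
--             answer += (n - i) * 2
--
--     return answer
-- ===== SOURCE B (Python) =====
-- def solution(cap, n, deli, pick):
--     # Ceil-division formulation: the trip count needed after house i is the
--     # running max of ceil(suffixP/cap), ceil(suffixD/cap); total distance is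
--     # 2 * sum of those running maxima (Abel summation of A's per-trip loop).
--     P = D = K = total = 0
--     for i in range(n):
--         P += pick[-1 - i]
--         D += deli[-1 - i]
--         K = max(K, -(-P // cap), -(-D // cap))
--         total += K
--     return 2 * total
-- ===== Notes on version B (the rewrite author's own statement) =====
-- stated objective: alternative
-- what changed: Replaces A's per-trip inner while-loop simulation with a single pass that keeps suffix sums of deli/pick and a running maximum of two integer ceil-divisions (trips needed so far), returning 2 * the Abel sum of those maxima.
-- outside the precondition, e.g. on solution(0, 1, [0], [0]): A returns 0, B raises ZeroDivisionError; on solution(1, 2, [5], [5]): A raises IndexError, B raises IndexError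
import Mathlib
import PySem

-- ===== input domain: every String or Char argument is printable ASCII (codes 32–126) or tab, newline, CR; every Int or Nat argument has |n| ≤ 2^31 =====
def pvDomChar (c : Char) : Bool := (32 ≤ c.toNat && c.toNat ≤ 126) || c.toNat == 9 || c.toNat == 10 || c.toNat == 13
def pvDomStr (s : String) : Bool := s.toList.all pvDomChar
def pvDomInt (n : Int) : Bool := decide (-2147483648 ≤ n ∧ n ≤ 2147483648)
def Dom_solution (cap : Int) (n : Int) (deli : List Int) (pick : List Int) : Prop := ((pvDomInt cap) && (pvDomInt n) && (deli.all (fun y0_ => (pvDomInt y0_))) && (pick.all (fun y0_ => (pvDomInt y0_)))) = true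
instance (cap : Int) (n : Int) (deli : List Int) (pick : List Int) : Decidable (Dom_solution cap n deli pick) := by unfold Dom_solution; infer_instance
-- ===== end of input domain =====

-- B replaces A's per-trip inner while-loop with a running max of two integer ceil-divisions
-- over suffix sums (objective: alternative decomposition, no inner loop).

-- ===== PORT A =====
-- the inner 'while p > 0 or d > 0' loop; fuel only makes it total (fuel never runs out under Pre_)
def solWhile (cap : Int) (coef : Int) : Nat → Int → Int → Int → Int × Int × Int
  | 0, p, d, ans => (p, d, ans)
  | f + 1, p, d, ans =>
    if p > 0 ∨ d > 0 then solWhile cap coef f (p - cap) (d - cap) (ans + coef * 2)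
    else (p, d, ans)

-- one iteration of 'for i in range(n)'; pyGetD's default is never used under Pre_ (i is in range)
def solStepA (cap : Int) (n : Int) (dl : List Int) (pk : List Int)
    (st : Int × Int × Int) (i : Int) : Int × Int × Int :=
  let p := st.1 + PySem.List.pyGetD pk i 0
  let d := st.2.1 + PySem.List.pyGetD dl i 0
  solWhile cap (n - i) (p.toNat + d.toNat + 1) p d st.2.2

def solution (cap : Int) (n : Int) (deli : List Int) (pick : List Int) : Int :=
  -- deli[::-1] / pick[::-1] = List.reverse (PySem.List.slice?_none_none_neg_one)
  let dl := deli.reverse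
  let pk := pick.reverse
  ((PySem.List.pyRange 0 n 1).foldl (solStepA cap n dl pk) (0, 0, 0)).2.2

-- ===== PORT B =====
-- one iteration of B's loop: suffix sums P D, running max K of the two ceil divisions -(-x//cap),
-- accumulated total; floordiv is total in Lean (cap = 0 is outside Pre_, where Source B raises)
def solStepB (cap : Int) (deli : List Int) (pick : List Int)
    (st : Int × Int × Int × Int) (i : Int) : Int × Int × Int × Int :=
  let P := st.1 + PySem.List.pyGetD pick (-1 - i) 0
  let D := st.2.1 + PySem.List.pyGetD deli (-1 - i) 0
  let K := max st.2.2.1 (max (-(PySem.Int.floordiv (-P) cap)) (-(PySem.Int.floordiv (-D) cap)))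
  (P, D, K, st.2.2.2 + K)

def solution_alt (cap : Int) (n : Int) (deli : List Int) (pick : List Int) : Int :=
  2 * ((PySem.List.pyRange 0 n 1).foldl (solStepB cap deli pick) (0, 0, 0, 0)).2.2.2

-- ===== PRECONDITION & SPEC =====
-- Pre_ excludes cap ≤ 0 (A loops forever whenever a cumulative demand is positive, and even where
-- A happens to return, B raises ZeroDivisionError on cap == 0) and n exceeding a list length
-- (A raises IndexError there).
def Pre_solution (cap : Int) (n : Int) (deli : List Int) (pick : List Int) : Prop :=
  1 ≤ cap ∧ n ≤ (deli.length : Int) ∧ n ≤ (pick.length : Int)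
instance (cap : Int) (n : Int) (deli : List Int) (pick : List Int) : Decidable (Pre_solution cap n deli pick) := by unfold Pre_solution; infer_instance

def pvWitness_solution : Int × Int × List Int × List Int := (4, 3, [1, 0, 2], [0, 3, 1])

def Spec_solution (cap : Int) (n : Int) (deli : List Int) (pick : List Int) (out : Int) : Prop := out = solution_alt cap n deli pick
instance (cap : Int) (n : Int) (deli : List Int) (pick : List Int) (out : Int) : Decidable (Spec_solution cap n deli pick out) := by unfold Spec_solution; infer_instance

-- ===== CLAIM (what is proved, stated in full; the proofs are below) =====
def Claim_equal_solution : Prop := ∀ (cap : Int) (n : Int) (deli : List Int) (pick : List Int), Dom_solution cap n deli pick → Pre_solution cap n deli pick → Spec_solution cap n deli pick (solution cap n deli pick)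

-- ===== LEMMAS AND PROOFS =====

-- ceiling division ⌈x / c⌉ for 0 < c, as Source B computes it
def pyCeil (c x : Int) : Int := -(PySem.Int.floordiv (-x) c)

theorem floordiv_add_mul (c a m : Int) (hc : 0 < c) :
    PySem.Int.floordiv (a + m * c) c = PySem.Int.floordiv a c + m := by
  have h := (PySem.Int.floordiv_eq_iff_of_pos hc (a := a) (q := PySem.Int.floordiv a c)).mp rfl
  refine (PySem.Int.floordiv_eq_iff_of_pos hc).mpr ⟨?_, ?_⟩ <;> nlinarith [h.1, h.2]

theorem pyCeil_shift (c x m : Int) (hc : 0 < c) : pyCeil c (x - m * c) = pyCeil c x - m := by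
  have : -(x - m * c) = -x + m * c := by ring
  simp only [pyCeil, this, floordiv_add_mul c (-x) m hc]
  ring

theorem pyCeil_nonpos (c x : Int) (hc : 0 < c) (hx : x ≤ 0) : pyCeil c x ≤ 0 := by
  have h := (PySem.Int.floordiv_eq_iff_of_pos hc (a := -x) (q := PySem.Int.floordiv (-x) c)).mp rfl
  simp only [pyCeil]
  nlinarith [h.1, h.2]

theorem pyCeil_pos_le (c x : Int) (hc : 0 < c) (hx : 0 < x) :
    1 ≤ pyCeil c x ∧ pyCeil c x ≤ x := by
  have h := (PySem.Int.floordiv_eq_iff_of_pos hc (a := -x) (q := PySem.Int.floordiv (-x) c)).mp rfl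
  constructor
  · simp only [pyCeil]; nlinarith [h.1, h.2]
  · simp only [pyCeil]; nlinarith [h.1, h.2]

-- the joint trip count A's inner while-loop performs
def ceilK (c p d : Int) : Int := max 0 (max (pyCeil c p) (pyCeil c d))

theorem ceilK_nonneg (c p d : Int) : 0 ≤ ceilK c p d := le_max_left _ _

theorem ceilK_le (c p d : Int) (hc : 0 < c) : ceilK c p d ≤ (p.toNat + d.toNat + 1 : Nat) := by
  have hp : pyCeil c p ≤ max p 0 := by
    by_cases h : p ≤ 0
    · exact le_trans (pyCeil_nonpos c p hc h) (le_max_right _ _)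
    · exact le_trans (pyCeil_pos_le c p hc (by omega)).2 (le_max_left _ _)
  have hd : pyCeil c d ≤ max d 0 := by
    by_cases h : d ≤ 0
    · exact le_trans (pyCeil_nonpos c d hc h) (le_max_right _ _)
    · exact le_trans (pyCeil_pos_le c d hc (by omega)).2 (le_max_left _ _)
  simp only [ceilK]
  omega

theorem solWhile_eq (c coef : Int) (hc : 0 < c) :
    ∀ (f : Nat) (p d ans : Int), ceilK c p d ≤ (f : Int) →
      solWhile c coef f p d ans =
        (p - ceilK c p d * c, d - ceilK c p d * c, ans + coef * 2 * ceilK c p d) := by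
  intro f
  induction f with
  | zero =>
    intro p d ans hf
    have h0 : ceilK c p d = 0 := le_antisymm (by exact_mod_cast hf) (ceilK_nonneg c p d)
    simp [solWhile, h0]
  | succ f ih =>
    intro p d ans hf
    by_cases hcond : p > 0 ∨ d > 0
    · have hk1 : 1 ≤ ceilK c p d := by
        rcases hcond with h | h
        · exact le_trans (pyCeil_pos_le c p hc h).1
            (le_trans (le_max_left _ _) (le_max_right _ _))
        · exact le_trans (pyCeil_pos_le c d hc h).1
            (le_trans (le_max_right _ _) (le_max_right _ _))
      have hshiftp : pyCeil c (p - c) = pyCeil c p - 1 := by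
        have := pyCeil_shift c p 1 hc; simpa using this
      have hshiftd : pyCeil c (d - c) = pyCeil c d - 1 := by
        have := pyCeil_shift c d 1 hc; simpa using this
      have hknext : ceilK c (p - c) (d - c) = ceilK c p d - 1 := by
        simp only [ceilK] at hk1 ⊢
        rw [hshiftp, hshiftd]
        omega
      have hle : ceilK c (p - c) (d - c) ≤ (f : Int) := by
        rw [hknext]; push_cast at hf ⊢; omega
      simp only [solWhile, if_pos hcond, ih (p - c) (d - c) (ans + coef * 2) hle, hknext]
      refine Prod.ext (by ring) (Prod.ext (by ring) (by simp; ring))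
    · have hcond' : p ≤ 0 ∧ d ≤ 0 := by omega
      have h0 : ceilK c p d = 0 := by
        have hp := pyCeil_nonpos c p hc hcond'.1
        have hd := pyCeil_nonpos c d hc hcond'.2
        simp only [ceilK]; omega
      rw [solWhile, if_neg hcond, h0]
      simp

-- the index correspondence: A reads pick[::-1][i], B reads pick[-1-i]
theorem getD_reverse_eq (l : List Int) (i : Int) (h0 : 0 ≤ i) (hi : i < (l.length : Int)) :
    PySem.List.pyGetD l.reverse i 0 = PySem.List.pyGetD l (-1 - i) 0 := by
  obtain ⟨k, rfl⟩ : ∃ k : Nat, i = (k : Int) := ⟨i.toNat, (Int.toNat_of_nonneg h0).symm⟩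
  have hk : k < l.length := by exact_mod_cast hi
  have hkr : k < l.reverse.length := by simpa using hk
  have hrev : PySem.List.pyGetD l.reverse (k : Int) 0 = l.reverse[k] :=
    PySem.List.pyGetD_ofNat l.reverse k 0 hkr
  have hneg : PySem.List.pyGetD l (-((k + 1 : Nat) : Int)) 0 = l[l.length - (k + 1)] := by
    apply PySem.List.pyGetD_neg_natCast <;> omega
  have harg : (-1 - (k : Int)) = -((k + 1 : Nat) : Int) := by push_cast; ring
  have hix : l.length - 1 - k = l.length - (k + 1) := by omega
  rw [hrev, harg, hneg, List.getElem_reverse]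
  congr 1

-- main induction: A's fold from index j equals 2 * B's fold, under the invariant
-- p = P - K*cap, d = D - K*cap, ans = 2*(tot + (n-j)*K)
theorem outer_eq (c nn : Int) (dl pk : List Int) (hc : 0 < c)
    (hld : nn ≤ (dl.length : Int)) (hlp : nn ≤ (pk.length : Int)) :
    ∀ (m : Nat) (j P D K tot : Int), 0 ≤ j → j ≤ nn → m = (nn - j).toNat →
      ((PySem.List.pyRange j nn 1).foldl (solStepA c nn dl.reverse pk.reverse)
          (P - K * c, D - K * c, 2 * (tot + (nn - j) * K))).2.2
        = 2 * ((PySem.List.pyRange j nn 1).foldl (solStepB c dl pk) (P, D, K, tot)).2.2.2 := by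
  intro m
  induction m with
  | zero =>
    intro j P D K tot h0 hjn hm
    have hj : j = nn := by omega
    subst hj
    rw [PySem.List.pyRange_one_eq_nil (le_refl j)]
    simp
  | succ m ih =>
    intro j P D K tot h0 hjn hm
    have hjlt : j < nn := by omega
    rw [PySem.List.pyRange_one_cons hjlt]
    simp only [List.foldl_cons]
    -- unfold one step of each side
    have hidx_p : PySem.List.pyGetD pk.reverse j 0 = PySem.List.pyGetD pk (-1 - j) 0 :=
      getD_reverse_eq pk j h0 (by omega)
    have hidx_d : PySem.List.pyGetD dl.reverse j 0 = PySem.List.pyGetD dl (-1 - j) 0 :=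
      getD_reverse_eq dl j h0 (by omega)
    set pv := PySem.List.pyGetD pk (-1 - j) 0 with hpv
    set dv := PySem.List.pyGetD dl (-1 - j) 0 with hdv
    have hstepA : solStepA c nn dl.reverse pk.reverse
        (P - K * c, D - K * c, 2 * (tot + (nn - j) * K)) j
        = solWhile c (nn - j)
            (((P - K * c) + pv).toNat + ((D - K * c) + dv).toNat + 1)
            ((P - K * c) + pv) ((D - K * c) + dv) (2 * (tot + (nn - j) * K)) := by
      simp only [solStepA, hidx_p, hidx_d]
    set p' := (P - K * c) + pv with hp'
    set d' := (D - K * c) + dv with hd'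
    have hfuel : ceilK c p' d' ≤ ((p'.toNat + d'.toNat + 1 : Nat) : Int) := ceilK_le c p' d' hc
    rw [hstepA, solWhile_eq c (nn - j) hc _ p' d' _ hfuel]
    -- identify B's one step
    have hstepB : solStepB c dl pk (P, D, K, tot) j
        = (P + pv, D + dv, max K (max (pyCeil c (P + pv)) (pyCeil c (D + dv))),
           tot + max K (max (pyCeil c (P + pv)) (pyCeil c (D + dv)))) := by
      simp only [solStepB, pyCeil, ← hpv, ← hdv]
    rw [hstepB]
    set K' := max K (max (pyCeil c (P + pv)) (pyCeil c (D + dv))) with hK'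
    -- k = K' - K via the ceil-shift
    have hsp : pyCeil c p' = pyCeil c (P + pv) - K := by
      have : p' = (P + pv) - K * c := by rw [hp']; ring
      rw [this, pyCeil_shift c (P + pv) K hc]
    have hsd : pyCeil c d' = pyCeil c (D + dv) - K := by
      have : d' = (D + dv) - K * c := by rw [hd']; ring
      rw [this, pyCeil_shift c (D + dv) K hc]
    have hk : ceilK c p' d' = K' - K := by
      simp only [ceilK, hsp, hsd, hK']; omega
    have hIH := ih (j + 1) (P + pv) (D + dv) K' (tot + K') (by omega) (by omega) (by omega)
    have e1 : p' - ceilK c p' d' * c = (P + pv) - K' * c := by rw [hk, hp']; ring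
    have e2 : d' - ceilK c p' d' * c = (D + dv) - K' * c := by rw [hk, hd']; ring
    have e3 : 2 * (tot + (nn - j) * K) + (nn - j) * 2 * ceilK c p' d'
        = 2 * ((tot + K') + (nn - (j + 1)) * K') := by rw [hk]; ring
    rw [e1, e2, e3]
    exact hIH

-- ===== VERDICT (by name: the statement is the Claim_ definition above) =====
theorem solution_spec : Claim_equal_solution := by
  intro cap n deli pick _ hpre
  obtain ⟨hc, hld, hlp⟩ := hpre
  show solution cap n deli pick = solution_alt cap n deli pick
  unfold solution solution_alt
  by_cases hn : n ≤ 0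
  · rw [PySem.List.pyRange_one_eq_nil hn]; simp
  · have h := outer_eq cap n deli pick (by omega) hld hlp n.toNat 0 0 0 0 0
      (le_refl 0) (by omega) (by omega)
    simpa using h
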